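-- pv_equiv track=rewrite | github.com/entingwu/AlgorithmPython | UnionFind/MaximumAssociationSet.py | maximum_association_set
-- ===== SOURCE A (Python) =====
-- from typing import (
--     List,
-- )
--
-- def maximum_association_set(list_a: List[str], list_b: List[str]) -> List[str]:
--     uf = UnionFind()
--     max_size, root = 0, ""
--     for i in range(len(list_a)):
--         a, b = list_a[i], list_b[i]
--         uf.add(a)
--         uf.add(b)
--         uf.union(a, b)
--     # 找到最大的集合大小max_size和最大结合的根root
--     for i in range(len(list_a)):
--         a, b = list_a[i], list_b[i]
--         if max_size < uf.get_size_of_set(a):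
--             root = a
--             max_size = uf.get_size_of_set(a)
--         if max_size < uf.get_size_of_set(b):
--             root = b
--             max_size = uf.get_size_of_set(b)
--
--     # 遍历字符串，找到所有和root相连的字符串
--     result = set()
--     for i in range(len(list_a)):
--         a, b = list_a[i], list_b[i]
--         if uf.is_connected(a, root):
--             result.add(a)
--         if uf.is_connected(b, root):
--             result.add(b)
--     return list(result)
--
-- class UnionFind:
--     def __init__(self):
--         self.father = {}
--         self.num_of_set = 0
--         self.size_of_set = {}
--
--     def add(self, x):
--         if x in self.father:
--             return
--         self.father[x] = None
--         self.num_of_set += 1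
--         self.size_of_set[x] = 1
--
--     def find(self, x):
--         root = x
--         while self.father[root] != None:
--             root = self.father[root]
--
--         while x != root:
--             origin_father = self.father[x]
--             self.father[x] = root
--             x = origin_father
--         return root
--
--     def union(self, x, y):
--         root_x, root_y = self.find(x), self.find(y)
--         if root_x != root_y:
--             self.father[root_x] = root_y
--             self.num_of_set -= 1
--             self.size_of_set[root_y] += self.size_of_set[root_x]
--
--     def is_connected(self, x, y):
--         return self.find(x) == self.find(y)
--
--     def get_num_of_set(self):
--         return self.num_of_set
--
--     def get_size_of_set(self, x):
--         return self.size_of_set[self.find(x)]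
-- ===== SOURCE B (Python) =====
-- def maximum_association_set(list_a, list_b):
--     # flat label-propagation over a dict instead of a union-find forest
--     comp = {}
--     size = {}
--     nxt = 0
--     for a, b in zip(list_a, list_b):
--         if a not in comp:
--             comp[a] = nxt
--             size[nxt] = 1
--             nxt += 1
--         if b not in comp:
--             comp[b] = nxt
--             size[nxt] = 1
--             nxt += 1
--         ca, cb = comp[a], comp[b]
--         if ca != cb:
--             comp = {k: (cb if v == ca else v) for k, v in comp.items()}
--             size[cb] += size[ca]
--     best, best_size = "", 0
--     for a, b in zip(list_a, list_b):
--         if best_size < size[comp[a]]: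
--             best, best_size = a, size[comp[a]]
--         if best_size < size[comp[b]]:
--             best, best_size = b, size[comp[b]]
--     target = comp.get(best)
--     result = set()
--     for a, b in zip(list_a, list_b):
--         if comp[a] == target:
--             result.add(a)
--         if comp[b] == target:
--             result.add(b)
--     return list(result)
-- ===== Notes on version B (the rewrite author's own statement) =====
-- stated objective: simpler
-- what changed: Replaces the union-find class (parent forest with path compression and fueled root-chasing) by a flat dict mapping each string to a component label, merging two components by relabelling the dict in one comprehension; the selection and collection scans keep A's order and tie-breaks.
import Mathlib
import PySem

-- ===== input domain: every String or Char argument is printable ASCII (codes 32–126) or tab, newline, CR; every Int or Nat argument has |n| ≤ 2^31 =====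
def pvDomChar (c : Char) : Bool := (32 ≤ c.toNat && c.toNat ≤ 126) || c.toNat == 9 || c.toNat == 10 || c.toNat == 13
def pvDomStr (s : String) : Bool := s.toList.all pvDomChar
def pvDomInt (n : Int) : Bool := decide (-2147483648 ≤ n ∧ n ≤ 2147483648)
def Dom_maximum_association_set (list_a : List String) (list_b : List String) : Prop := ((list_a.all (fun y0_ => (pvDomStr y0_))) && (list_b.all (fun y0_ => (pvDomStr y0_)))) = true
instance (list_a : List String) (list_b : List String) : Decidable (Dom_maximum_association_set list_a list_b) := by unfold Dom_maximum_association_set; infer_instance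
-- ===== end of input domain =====

-- B replaces A's union-find class (parent forest, path compression) by a flat string→label dict
-- merged by relabelling (objective: simpler). Both Pythons return list(result) for a set built in
-- the same pair-scan order; the proof shows the two returned lists are identical.

-- ===== PORT A =====

-- while father[root] != None: root = father[root]   (fuel = number of keys + 1, never exhausted:
-- the chain visits distinct keys — proved below)
def ufFindRootLoop (F : PySem.Dict String (Option String)) (root : String) : Nat → String
  | 0 => root
  | fuel+1 =>
    match F.get? root with
    | some (some p) => ufFindRootLoop F p fuel
    | _ => root  -- some none: loop exit; none would be a KeyError, unreachable (keys are closed under parent)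

-- while x != root: origin_father = father[x]; father[x] = root; x = origin_father
def ufCompressLoop (F : PySem.Dict String (Option String)) (x root : String) : Nat → PySem.Dict String (Option String)
  | 0 => F
  | fuel+1 =>
    if x == root then F
    else
      match F.get? x with
      | some (some p) => ufCompressLoop (F.insert x (some root)) p root fuel
      | _ => F.insert x (some root)  -- unreachable: on the path to root every non-root node has a parent

structure PyUF where
  father : PySem.Dict String (Option String)
  numOfSet : Int
  sizeOfSet : PySem.Dict String Int
  deriving Repr, DecidableEq

def ufAdd (uf : PyUF) (x : String) : PyUF :=
  if uf.father.contains x then uf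
  else { father := uf.father.insert x none,
         numOfSet := uf.numOfSet + 1,
         sizeOfSet := uf.sizeOfSet.insert x 1 }

def ufFind (uf : PyUF) (x : String) : String × PyUF :=
  let root := ufFindRootLoop uf.father x (uf.father.size + 1)
  let F' := ufCompressLoop uf.father x root (uf.father.size + 1)
  (root, { uf with father := F' })

def ufUnion (uf : PyUF) (x y : String) : PyUF :=
  let fx := ufFind uf x
  let fy := ufFind fx.2 y
  let rootX := fx.1
  let rootY := fy.1
  let uf := fy.2
  if rootX ≠ rootY then
    { father := uf.father.insert rootX (some rootY),
      numOfSet := uf.numOfSet - 1,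
      -- size_of_set[root_y] += size_of_set[root_x]: both keys are always present here (the defaults are never read)
      sizeOfSet := uf.sizeOfSet.modify rootY 0 (· + uf.sizeOfSet.getD rootX 0) }
  else uf

def ufIsConnected (uf : PyUF) (x y : String) : Bool × PyUF :=
  let fx := ufFind uf x
  let fy := ufFind fx.2 y
  (fx.1 == fy.1, fy.2)

def ufGetSize (uf : PyUF) (x : String) : Int × PyUF :=
  let fx := ufFind uf x
  (fx.2.sizeOfSet.getD fx.1 0, fx.2)  -- size_of_set[root]: the key is always present here

-- loop bodies of A's three scans (uf.add(a); uf.add(b); uf.union(a, b) / max_size-root scan / result scan)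
def aStep1 (uf : PyUF) (a b : String) : PyUF :=
  ufUnion (ufAdd (ufAdd uf a) b) a b

def aStep2 (st : PyUF × Int × String) (a b : String) : PyUF × Int × String :=
  let ga := ufGetSize st.1 a
  let st1 : PyUF × Int × String :=
    if st.2.1 < ga.1 then
      let ga2 := ufGetSize ga.2 a
      (ga2.2, ga2.1, a)
    else (ga.2, st.2.1, st.2.2)
  let gb := ufGetSize st1.1 b
  if st1.2.1 < gb.1 then
    let gb2 := ufGetSize gb.2 b
    (gb2.2, gb2.1, b)
  else (gb.2, st1.2.1, st1.2.2)

def aStep3 (root : String) (st : PyUF × PySem.Set String) (a b : String) : PyUF × PySem.Set String :=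
  let ca := ufIsConnected st.1 a root
  let r1 := if ca.1 then st.2.add a else st.2
  let cb := ufIsConnected ca.2 b root
  let r2 := if cb.1 then r1.add b else r1
  (cb.2, r2)

def maximum_association_set (list_a : List String) (list_b : List String) : List String :=
  -- for i in range(len(list_a)): a, b = list_a[i], list_b[i]; …
  -- (list_b[i] raises IndexError when len(list_b) < len(list_a) — excluded by Pre_)
  let uf1 := (PySem.List.pyRange 0 (list_a.length : Int) 1).foldl (fun uf i =>
      aStep1 uf (PySem.List.pyGetD list_a i "") (PySem.List.pyGetD list_b i "")) ⟨PySem.Dict.empty, 0, PySem.Dict.empty⟩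
  let st2 := (PySem.List.pyRange 0 (list_a.length : Int) 1).foldl (fun st i =>
      aStep2 st (PySem.List.pyGetD list_a i "") (PySem.List.pyGetD list_b i "")) (uf1, (0 : Int), "")
  let st3 := (PySem.List.pyRange 0 (list_a.length : Int) 1).foldl (fun st i =>
      aStep3 st2.2.2 st (PySem.List.pyGetD list_a i "") (PySem.List.pyGetD list_b i "")) (st2.1, PySem.Set.empty)
  st3.2  -- list(result): the set's elements in insertion order

-- ===== PORT B =====

def bPhase1Step (st : PySem.Dict String Int × PySem.Dict Int Int × Int) (ab : String × String) :
    PySem.Dict String Int × PySem.Dict Int Int × Int :=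
  let s1 : PySem.Dict String Int × PySem.Dict Int Int × Int :=
    if st.1.contains ab.1 then st
    else (st.1.insert ab.1 st.2.2, st.2.1.insert st.2.2 1, st.2.2 + 1)
  let s2 : PySem.Dict String Int × PySem.Dict Int Int × Int :=
    if s1.1.contains ab.2 then s1
    else (s1.1.insert ab.2 s1.2.2, s1.2.1.insert s1.2.2 1, s1.2.2 + 1)
  let ca := s2.1.getD ab.1 0
  let cb := s2.1.getD ab.2 0
  if ca ≠ cb then
    -- comp = {k: (cb if v == ca else v) for k, v in comp.items()}
    (PySem.Dict.mk (s2.1.items.map (fun p => (p.1, if p.2 == ca then cb else p.2))),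
     s2.2.1.modify cb 0 (· + s2.2.1.getD ca 0), s2.2.2)
  else s2

def bSelStep (comp : PySem.Dict String Int) (size : PySem.Dict Int Int) (st : String × Int) (ab : String × String) : String × Int :=
  let st1 : String × Int :=
    if st.2 < size.getD (comp.getD ab.1 0) 0 then (ab.1, size.getD (comp.getD ab.1 0) 0) else st
  if st1.2 < size.getD (comp.getD ab.2 0) 0 then (ab.2, size.getD (comp.getD ab.2 0) 0) else st1

def bCollectStep (comp : PySem.Dict String Int) (target : Option Int) (res : PySem.Set String) (ab : String × String) : PySem.Set String :=
  let r1 := if comp.get? ab.1 == target then res.add ab.1 else res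
  if comp.get? ab.2 == target then r1.add ab.2 else r1

def maximum_association_set_alt (list_a : List String) (list_b : List String) : List String :=
  let pairs := list_a.zip list_b
  let s := pairs.foldl bPhase1Step (PySem.Dict.empty, PySem.Dict.empty, 0)
  let sel := pairs.foldl (bSelStep s.1 s.2.1) ("", 0)
  pairs.foldl (bCollectStep s.1 (s.1.get? sel.1)) PySem.Set.empty

-- ===== PRECONDITION & SPEC =====
-- A indexes list_b[i] for every i < len(list_a): when list_b is shorter A raises IndexError, so those inputs are excluded.
def Pre_maximum_association_set (list_a : List String) (list_b : List String) : Prop :=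
  list_a.length ≤ list_b.length
instance (list_a : List String) (list_b : List String) : Decidable (Pre_maximum_association_set list_a list_b) := by unfold Pre_maximum_association_set; infer_instance

def pvWitness_maximum_association_set : List String × List String := (["a", "b"], ["b", "c"])

def Spec_maximum_association_set (list_a : List String) (list_b : List String) (out : List String) : Prop := out = maximum_association_set_alt list_a list_b
instance (list_a : List String) (list_b : List String) (out : List String) : Decidable (Spec_maximum_association_set list_a list_b out) := by unfold Spec_maximum_association_set; infer_instance

-- ===== CLAIM (what is proved, stated in full; the proofs are below) =====
def Claim_equal_maximum_association_set : Prop := ∀ (list_a : List String) (list_b : List String), Dom_maximum_association_set list_a list_b → Pre_maximum_association_set list_a list_b → Spec_maximum_association_set list_a list_b (maximum_association_set list_a list_b)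

-- ===== LEMMAS AND PROOFS =====

-- `chase F n x` follows father pointers for at most n steps; `some r` = the root was reached.
def chase (F : PySem.Dict String (Option String)) : Nat → String → Option String
  | 0, _ => none
  | n+1, x =>
    match F.get? x with
    | some none => some x
    | some (some p) => chase F n p
    | none => none

def Root (F : PySem.Dict String (Option String)) (x r : String) : Prop := ∃ n, chase F n x = some r

-- acyclicity witness: father pointers strictly increase `ord` and stay inside the key set
def Forest (F : PySem.Dict String (Option String)) (ord : String → Nat) : Prop :=
  ∀ x p, F.get? x = some (some p) → ord x < ord p ∧ p ∈ F.keys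

theorem chase_succ {F : PySem.Dict String (Option String)} {n : Nat} {x r : String}
    (h : chase F n x = some r) : chase F (n+1) x = some r := by
  induction n generalizing x with
  | zero => simp [chase] at h
  | succ n ih =>
    rw [chase] at h ⊢
    rcases hg : F.get? x with _ | (_ | p) <;> simp [hg] at h ⊢ <;> try exact h
    exact ih h

theorem chase_le {F : PySem.Dict String (Option String)} {n m : Nat} {x r : String}
    (hnm : n ≤ m) (h : chase F n x = some r) : chase F m x = some r := by
  induction hnm with
  | refl => exact h
  | step _ ih => exact chase_succ ih

theorem Root_unique {F : PySem.Dict String (Option String)} {x r₁ r₂ : String}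
    (h₁ : Root F x r₁) (h₂ : Root F x r₂) : r₁ = r₂ := by
  obtain ⟨n₁, h₁⟩ := h₁
  obtain ⟨n₂, h₂⟩ := h₂
  have e₁ := chase_le (Nat.le_max_left n₁ n₂) h₁
  have e₂ := chase_le (Nat.le_max_right n₁ n₂) h₂
  rw [e₁] at e₂; exact Option.some_inj.mp e₂

theorem chase_root_get {F : PySem.Dict String (Option String)} {n : Nat} {x r : String}
    (h : chase F n x = some r) : F.get? r = some none := by
  induction n generalizing x with
  | zero => simp [chase] at h
  | succ n ih =>
    rw [chase] at h
    rcases hg : F.get? x with _ | (_ | p) <;> simp [hg] at h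
    · exact h ▸ hg
    · exact ih h

theorem mem_keys_of_get?_eq_some {F : PySem.Dict String (Option String)} {x : String} {v : Option String}
    (h : F.get? x = some v) : x ∈ F.keys := by
  by_contra hx
  rw [(PySem.Dict.get?_eq_none_iff_not_mem_keys F x).mpr hx] at h
  simp at h

theorem root_mem_keys {F : PySem.Dict String (Option String)} {x r : String}
    (h : Root F x r) : r ∈ F.keys := by
  obtain ⟨n, h⟩ := h
  exact mem_keys_of_get?_eq_some (chase_root_get h)

theorem chase_ord_le {F : PySem.Dict String (Option String)} {ord : String → Nat}
    (hf : Forest F ord) {n : Nat} {x r : String} (h : chase F n x = some r) : ord x ≤ ord r := by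
  induction n generalizing x with
  | zero => simp [chase] at h
  | succ n ih =>
    rw [chase] at h
    rcases hg : F.get? x with _ | (_ | p) <;> simp [hg] at h
    · exact h ▸ Nat.le_refl _
    · exact Nat.le_of_lt (Nat.lt_of_lt_of_le (hf x p hg).1 (ih h))

theorem findRootLoop_eq {F : PySem.Dict String (Option String)} {n : Nat} {x r : String}
    (h : chase F n x = some r) : ufFindRootLoop F x n = r := by
  induction n generalizing x with
  | zero => simp [chase] at h
  | succ n ih =>
    rw [chase] at h
    rw [ufFindRootLoop]
    rcases hg : F.get? x with _ | (_ | p) <;> simp [hg] at h ⊢ <;> try exact h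
    exact ih h

theorem chase_total_aux {F : PySem.Dict String (Option String)} {ord : String → Nat}
    (hf : Forest F ord) :
    ∀ (k : Nat) (x : String), x ∈ F.keys →
      (F.keys.filter (fun y => decide (ord x ≤ ord y))).length ≤ k →
      ∃ r, chase F k x = some r := by
  intro k
  induction k with
  | zero =>
    intro x hx hlen
    exfalso
    have hxm : x ∈ F.keys.filter (fun y => decide (ord x ≤ ord y)) := by
      simp [List.mem_filter, hx]
    have := List.length_pos_of_mem hxm
    omega
  | succ k ih =>
    intro x hx hlen
    rcases hg : F.get? x with _ | (_ | p)
    · exact absurd ((PySem.Dict.get?_eq_none_iff_not_mem_keys F x).mp hg) (by simp [hx])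
    · exact ⟨x, by rw [chase, hg]⟩
    · obtain ⟨hlt, hp⟩ := hf x p hg
      have hsub1 : (F.keys.filter (fun y => decide (ord p ≤ ord y))).Sublist
          (F.keys.filter (fun y => decide (ord x < ord y))) := by
        apply List.monotone_filter_right
        intro a ha
        simp at ha ⊢
        omega
      have hsub2 : (F.keys.filter (fun y => decide (ord x < ord y))).Sublist
          (F.keys.filter (fun y => decide (ord x ≤ ord y))) := by
        apply List.monotone_filter_right
        intro a ha
        simp at ha ⊢
        omega
      have hne : (F.keys.filter (fun y => decide (ord x < ord y))).length <
          (F.keys.filter (fun y => decide (ord x ≤ ord y))).length := by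
        rcases Nat.lt_or_ge (F.keys.filter (fun y => decide (ord x < ord y))).length
            (F.keys.filter (fun y => decide (ord x ≤ ord y))).length with h | h
        · exact h
        · exfalso
          have heq := hsub2.eq_of_length (Nat.le_antisymm hsub2.length_le h)
          have hxm : x ∈ F.keys.filter (fun y => decide (ord x ≤ ord y)) := by
            simp [List.mem_filter, hx]
          rw [← heq] at hxm
          simp [List.mem_filter] at hxm
      obtain ⟨r, hr⟩ := ih p hp (by have := hsub1.length_le; omega)
      exact ⟨r, by rw [chase, hg]; exact hr⟩

theorem chase_total {F : PySem.Dict String (Option String)} {ord : String → Nat}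
    (hf : Forest F ord) {x : String} (hx : x ∈ F.keys) :
    ∃ r, chase F (F.size + 1) x = some r := by
  have hlen : (F.keys.filter (fun y => decide (ord x ≤ ord y))).length ≤ F.size + 1 := by
    have h1 := List.length_filter_le (fun y => decide (ord x ≤ ord y)) F.keys
    have h2 : F.keys.length = F.size := by
      simp [PySem.Dict.keys, PySem.Dict.size]
    omega
  exact chase_total_aux hf (F.size + 1) x hx hlen

theorem chase_stop {F : PySem.Dict String (Option String)} {x : String} {n : Nat}
    (hg : F.get? x = some none) : chase F (n+1) x = some x := by
  rw [chase, hg]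

theorem chase_step {F : PySem.Dict String (Option String)} {x p : String} {n : Nat} {r : String}
    (hg : F.get? x = some (some p)) (h : chase F n p = some r) : chase F (n+1) x = some r := by
  rw [chase, hg]; exact h

theorem chase_insert_fresh {F : PySem.Dict String (Option String)} {x : String}
    (hx : x ∉ F.keys) {n : Nat} {y r : String} (h : chase F n y = some r) :
    chase (F.insert x none) n y = some r := by
  induction n generalizing y with
  | zero => simp [chase] at h
  | succ n ih =>
    rw [chase] at h ⊢
    rcases hg : F.get? y with _ | (_ | p) <;> simp [hg] at h
    · have hy : y ≠ x := fun he => hx (he ▸ mem_keys_of_get?_eq_some hg)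
      rw [PySem.Dict.get?_insert_of_ne _ _ hy, hg]
      simpa using h
    · have hy : y ≠ x := fun he => hx (he ▸ mem_keys_of_get?_eq_some hg)
      rw [PySem.Dict.get?_insert_of_ne _ _ hy, hg]
      exact ih h

theorem chase_insert_link_other {F : PySem.Dict String (Option String)} {rx ry : String}
    (hrx : F.get? rx = some none) {n : Nat} {y r : String} (hr : r ≠ rx)
    (h : chase F n y = some r) : chase (F.insert rx (some ry)) n y = some r := by
  induction n generalizing y with
  | zero => simp [chase] at h
  | succ n ih =>
    rw [chase] at h ⊢
    by_cases hy : y = rx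
    · subst hy
      rw [hrx] at h
      simp at h
      exact absurd h.symm hr
    · rw [PySem.Dict.get?_insert_of_ne _ _ hy]
      rcases hg : F.get? y with _ | (_ | p) <;> simp [hg] at h ⊢
      · exact h
      · exact ih h

theorem chase_insert_link_rx {F : PySem.Dict String (Option String)} {rx ry : String}
    (hrx : F.get? rx = some none) (hry : F.get? ry = some none) (hne : rx ≠ ry)
    {n : Nat} {y : String} (h : chase F n y = some rx) :
    Root (F.insert rx (some ry)) y ry := by
  induction n generalizing y with
  | zero => simp [chase] at h
  | succ n ih =>
    rw [chase] at h
    rcases hg : F.get? y with _ | (_ | p) <;> simp [hg] at h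
    · -- y is a root, so y = rx
      subst h
      exact ⟨0+1+1, chase_step (PySem.Dict.get?_insert_self _ _ _)
        (chase_stop (by rw [PySem.Dict.get?_insert_of_ne _ _ (Ne.symm hne)]; exact hry))⟩
    · have hy : y ≠ rx := by
        intro he; rw [he] at hg; rw [hrx] at hg; simp at hg
      obtain ⟨m, hm⟩ := ih h
      exact ⟨m+1, by rw [chase, PySem.Dict.get?_insert_of_ne _ _ hy, hg]; exact hm⟩

-- path compression: redirecting x straight to its root changes no node's root
theorem chase_insert_toRoot {F : PySem.Dict String (Option String)} {x p r : String}
    (hg : F.get? x = some (some p)) (hroot : Root F x r) (hx : x ≠ r) :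
    ∀ y s, Root F y s → Root (F.insert x (some r)) y s := by
  have hrr : F.get? r = some none := by
    obtain ⟨n, hn⟩ := hroot; exact chase_root_get hn
  intro y s hs
  obtain ⟨m, hm⟩ := hs
  induction m generalizing y with
  | zero => simp [chase] at hm
  | succ m ih =>
    rw [chase] at hm
    rcases hgy : F.get? y with _ | (_ | q) <;> simp [hgy] at hm
    · -- y is a root: y = s, y ≠ x
      subst hm
      have hy : y ≠ x := by
        intro he; rw [he, hg] at hgy; simp at hgy
      exact ⟨1, by rw [chase, PySem.Dict.get?_insert_of_ne _ _ hy, hgy]⟩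
    · by_cases hy : y = x
      · -- shortcut: y = x jumps straight to r; s must be r
        subst hy
        have hq : q = p := by rw [hg] at hgy; simpa using hgy.symm
        subst hq
        have hsr : s = r := Root_unique ⟨m+1, by rw [chase, hg]; exact hm⟩ hroot
        subst hsr
        exact ⟨0+1+1, chase_step (PySem.Dict.get?_insert_self _ _ _)
          (chase_stop (by rw [PySem.Dict.get?_insert_of_ne _ _ (fun he => hx he.symm)]; exact hrr))⟩
      · obtain ⟨m', hm'⟩ := ih q hm
        exact ⟨m'+1, by rw [chase, PySem.Dict.get?_insert_of_ne _ _ hy, hgy]; exact hm'⟩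

theorem compress_spec :
    ∀ (fuel : Nat) (F : PySem.Dict String (Option String)) (ord : String → Nat) (x r : String),
      Forest F ord → Root F x r →
      (ufCompressLoop F x r fuel).keys = F.keys ∧
      Forest (ufCompressLoop F x r fuel) ord ∧
      (∀ y s, Root F y s → Root (ufCompressLoop F x r fuel) y s) := by
  intro fuel
  induction fuel with
  | zero =>
    intro F ord x r hf hroot
    exact ⟨rfl, hf, fun y s h => h⟩
  | succ fuel ih =>
    intro F ord x r hf hroot
    rw [ufCompressLoop]
    by_cases hxr : x = r
    · rw [if_pos (by simp [hxr])]
      exact ⟨rfl, hf, fun y s h => h⟩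
    · simp only [beq_iff_eq, hxr, if_false]
      obtain ⟨n, hn⟩ := hroot
      cases n with
      | zero => simp [chase] at hn
      | succ n =>
        rw [chase] at hn
        rcases hg : F.get? x with _ | (_ | p) <;> rw [hg] at hn
        · simp at hn
        · simp at hn; exact absurd hn hxr
        · -- continue with F₁ := F.insert x (some r)
          have hroot' : Root F x r := ⟨n+1, by rw [chase, hg]; exact hn⟩
          have hrootp : Root F p r := ⟨n, hn⟩
          have hxk : x ∈ F.keys := mem_keys_of_get?_eq_some hg
          have hrr : F.get? r = some none := chase_root_get (n := n+1) (by rw [chase, hg]; exact hn)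
          have hrk : r ∈ F.keys := mem_keys_of_get?_eq_some hrr
          have hkeys1 : (F.insert x (some r)).keys = F.keys :=
            PySem.Dict.keys_insert_of_contains F _ ((PySem.Dict.contains_iff_mem_keys F x).mpr hxk)
          have hordxr : ord x < ord r := by
            have h1 := (hf x p hg).1
            have h2 := chase_ord_le hf hn
            omega
          have hf1 : Forest (F.insert x (some r)) ord := by
            intro y q hq
            rw [hkeys1]
            by_cases hy : y = x
            · subst hy
              rw [PySem.Dict.get?_insert_self] at hq
              have hrq : r = q := by simpa using hq
              subst hrq
              exact ⟨hordxr, hrk⟩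
            · rw [PySem.Dict.get?_insert_of_ne _ _ hy] at hq
              exact hf y q hq
          have hpres1 := chase_insert_toRoot hg hroot' hxr
          obtain ⟨hk2, hf2, hpres2⟩ := ih (F.insert x (some r)) ord p r hf1 (hpres1 p r hrootp)
          exact ⟨hk2.trans hkeys1, hf2, fun y s h => hpres2 y s (hpres1 y s h)⟩

theorem find_spec {uf : PyUF} {ord : String → Nat} {x r : String}
    (hf : Forest uf.father ord) {hx : x ∈ uf.father.keys} (hr : Root uf.father x r) :
    (ufFind uf x).1 = r ∧
    (ufFind uf x).2.father.keys = uf.father.keys ∧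
    Forest (ufFind uf x).2.father ord ∧
    (∀ y s, Root uf.father y s → Root (ufFind uf x).2.father y s) ∧
    (ufFind uf x).2.sizeOfSet = uf.sizeOfSet ∧
    (ufFind uf x).2.numOfSet = uf.numOfSet := by
  obtain ⟨r', hch⟩ := chase_total hf hx
  have hrr : r' = r := Root_unique ⟨_, hch⟩ hr
  subst hrr
  have hloop : ufFindRootLoop uf.father x (uf.father.size + 1) = r' := findRootLoop_eq hch
  obtain ⟨hk, hf2, hpres⟩ := compress_spec (uf.father.size + 1) uf.father ord x r' hf ⟨_, hch⟩
  refine ⟨?_, ?_, ?_, ?_, rfl, rfl⟩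
  · simp [ufFind, hloop]
  · simpa [ufFind, hloop] using hk
  · simpa [ufFind, hloop] using hf2
  · simpa [ufFind, hloop] using hpres

-- the simulation relation: A's union-find state realises the same partition and sizes as B's label dicts
def UFRel (uf : PyUF) (comp : PySem.Dict String Int) (size : PySem.Dict Int Int) (nxt : Int)
    (ord : String → Nat) (ρ : String → String) : Prop :=
  Forest uf.father ord ∧
  uf.father.keys = comp.keys ∧
  (∀ x ∈ uf.father.keys, Root uf.father x (ρ x)) ∧
  (∀ x ∈ uf.father.keys, ∀ y ∈ uf.father.keys, (ρ x = ρ y ↔ comp.getD x 0 = comp.getD y 0)) ∧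
  (∀ x ∈ uf.father.keys, uf.sizeOfSet.getD (ρ x) 0 = size.getD (comp.getD x 0) 0) ∧
  (∀ x ∈ uf.father.keys, comp.getD x 0 < nxt) ∧
  (∀ x ∈ uf.father.keys, 1 ≤ size.getD (comp.getD x 0) 0)

theorem rho_mem {uf : PyUF} {comp size nxt ord ρ} (h : UFRel uf comp size nxt ord ρ)
    {x : String} (hx : x ∈ uf.father.keys) : ρ x ∈ uf.father.keys :=
  root_mem_keys (h.2.2.1 x hx)

theorem rho_get_none {uf : PyUF} {comp size nxt ord ρ} (h : UFRel uf comp size nxt ord ρ)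
    {x : String} (hx : x ∈ uf.father.keys) : uf.father.get? (ρ x) = some none := by
  obtain ⟨n, hn⟩ := h.2.2.1 x hx
  exact chase_root_get hn

theorem rho_fix {uf : PyUF} {comp size nxt ord ρ} (h : UFRel uf comp size nxt ord ρ)
    {x : String} (hx : x ∈ uf.father.keys) : ρ (ρ x) = ρ x :=
  Root_unique (h.2.2.1 (ρ x) (rho_mem h hx)) ⟨0+1, chase_stop (rho_get_none h hx)⟩

theorem rho_edge {uf : PyUF} {comp size nxt ord ρ} (h : UFRel uf comp size nxt ord ρ)
    {y p : String} (hg : uf.father.get? y = some (some p)) : ρ y = ρ p := by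
  have hy : y ∈ uf.father.keys := mem_keys_of_get?_eq_some hg
  have hp : p ∈ uf.father.keys := (h.1 y p hg).2
  obtain ⟨n, hn⟩ := h.2.2.1 y hy
  cases n with
  | zero => simp [chase] at hn
  | succ n =>
    rw [chase, hg] at hn
    exact Root_unique ⟨n, hn⟩ (h.2.2.1 p hp)

theorem inv_find {uf : PyUF} {comp size nxt ord ρ} (h : UFRel uf comp size nxt ord ρ)
    {x : String} (hx : x ∈ uf.father.keys) :
    (ufFind uf x).1 = ρ x ∧ UFRel (ufFind uf x).2 comp size nxt ord ρ ∧
    (ufFind uf x).2.father.keys = uf.father.keys ∧ (ufFind uf x).2.sizeOfSet = uf.sizeOfSet := by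
  obtain ⟨hf, hkeys, hroot, hlab, hsz, hlt, hpos⟩ := h
  obtain ⟨h1, h2, h3, h4, h5, h6⟩ := find_spec hf (hx := hx) (hroot x hx)
  refine ⟨h1, ⟨h3, by rw [h2, hkeys], ?_, ?_, ?_, ?_, ?_⟩, h2, h5⟩
  · intro y hy; rw [h2] at hy; exact h4 y (ρ y) (hroot y hy)
  · intro y hy z hz; rw [h2] at hy hz; exact hlab y hy z hz
  · intro y hy; rw [h2] at hy; rw [h5]; exact hsz y hy
  · intro y hy; rw [h2] at hy; exact hlt y hy
  · intro y hy; rw [h2] at hy; exact hpos y hy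

theorem contains_congr {uf : PyUF} {comp : PySem.Dict String Int} (hkeys : uf.father.keys = comp.keys)
    (a : String) : uf.father.contains a = comp.contains a := by
  rw [PySem.Dict.contains_eq_decide_mem_keys, PySem.Dict.contains_eq_decide_mem_keys, hkeys]

theorem inv_add_mem {uf : PyUF} {a : String} (ha : a ∈ uf.father.keys) : ufAdd uf a = uf := by
  rw [ufAdd, if_pos ((PySem.Dict.contains_iff_mem_keys _ _).mpr ha)]

theorem inv_add_new {uf : PyUF} {comp size nxt ord ρ} (h : UFRel uf comp size nxt ord ρ)
    {a : String} (ha : a ∉ uf.father.keys) :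
    UFRel (ufAdd uf a) (comp.insert a nxt) (size.insert nxt 1) (nxt + 1) ord
      (fun y => if y = a then a else ρ y) ∧
    (ufAdd uf a).father.keys = uf.father.keys ++ [a] := by
  obtain ⟨hf, hkeys, hroot, hlab, hsz, hlt, hpos⟩ := h
  have hca : uf.father.contains a = false := by
    rw [← Bool.not_eq_true]; exact fun hc => ha ((PySem.Dict.contains_iff_mem_keys _ _).mp hc)
  have hdef : ufAdd uf a = { father := uf.father.insert a none, numOfSet := uf.numOfSet + 1, sizeOfSet := uf.sizeOfSet.insert a 1 } := by
    rw [ufAdd, if_neg (by simp [hca])]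
  have hrhoa : ∀ y ∈ uf.father.keys, ρ y ≠ a := by
    intro y hy he
    exact ha (he ▸ root_mem_keys (hroot y hy))
  have hya : ∀ y ∈ uf.father.keys, y ≠ a := fun y hy he => ha (he ▸ hy)
  rw [hdef]
  have hk' : ({ father := uf.father.insert a none, numOfSet := uf.numOfSet + 1, sizeOfSet := uf.sizeOfSet.insert a 1 } : PyUF).father.keys = uf.father.keys ++ [a] :=
    PySem.Dict.keys_insert_of_not_contains _ _ hca
  refine ⟨⟨?_, ?_, ?_, ?_, ?_, ?_, ?_⟩, hk'⟩
  · -- Forest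
    intro y p hq
    by_cases hy : y = a
    · subst hy; rw [PySem.Dict.get?_insert_self] at hq; simp at hq
    · rw [PySem.Dict.get?_insert_of_ne _ _ hy] at hq
      obtain ⟨h1, h2⟩ := hf y p hq
      exact ⟨h1, by rw [show ({ father := uf.father.insert a none, numOfSet := uf.numOfSet + 1, sizeOfSet := uf.sizeOfSet.insert a 1 } : PyUF).father = uf.father.insert a none from rfl, PySem.Dict.keys_insert_of_not_contains _ _ hca]; simp [h2]⟩
  · -- keys
    show (uf.father.insert a none).keys = (comp.insert a nxt).keys
    rw [PySem.Dict.keys_insert_of_not_contains _ _ hca,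
        PySem.Dict.keys_insert_of_not_contains _ _ (by rw [← contains_congr hkeys]; exact hca), hkeys]
  · -- Root
    intro y hy
    rw [hk'] at hy
    simp only [List.mem_append, List.mem_singleton] at hy
    rcases hy with hy | hy
    · simp only [hya y hy, if_false]
      obtain ⟨n, hn⟩ := hroot y hy
      exact ⟨n, chase_insert_fresh ha hn⟩
    · subst hy
      simp only [if_pos rfl]
      exact ⟨0+1, chase_stop (PySem.Dict.get?_insert_self _ _ _)⟩
  · -- labels iff
    intro y hy z hz
    rw [hk'] at hy hz
    simp only [List.mem_append, List.mem_singleton] at hy hz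
    simp only [PySem.Dict.getD_insert]
    rcases hy with hy | hy <;> rcases hz with hz | hz
    · simp only [hya y hy, hya z hz, if_false]
      exact hlab y hy z hz
    · subst hz
      simp only [hya y hy, if_false, eq_self_iff_true, if_true]
      constructor
      · intro he; exact absurd he (hrhoa y hy)
      · intro he; exact absurd he (by have := hlt y hy; omega)
    · subst hy
      simp only [hya z hz, if_false, eq_self_iff_true, if_true]
      constructor
      · intro he; exact absurd he.symm (hrhoa z hz)
      · intro he; exact absurd he.symm (by have := hlt z hz; omega)
    · subst hy; subst hz; simp
  · -- sizes
    intro y hy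
    rw [hk'] at hy
    simp only [List.mem_append, List.mem_singleton] at hy
    show (uf.sizeOfSet.insert a 1).getD _ 0 = (size.insert nxt 1).getD ((comp.insert a nxt).getD y 0) 0
    simp only [PySem.Dict.getD_insert]
    rcases hy with hy | hy
    · simp only [hya y hy, hrhoa y hy, if_false]
      rw [if_neg (by have := hlt y hy; omega)]
      exact hsz y hy
    · subst hy
      simp
  · -- labels < nxt+1
    intro y hy
    rw [hk'] at hy
    simp only [List.mem_append, List.mem_singleton] at hy
    simp only [PySem.Dict.getD_insert]
    rcases hy with hy | hy
    · rw [if_neg (hya y hy)]; have := hlt y hy; omega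
    · subst hy; rw [if_pos rfl]; omega
  · -- sizes positive
    intro y hy
    rw [hk'] at hy
    simp only [List.mem_append, List.mem_singleton] at hy
    simp only [PySem.Dict.getD_insert]
    rcases hy with hy | hy
    · rw [if_neg (hya y hy), if_neg (by have := hlt y hy; omega)]
      exact hpos y hy
    · subst hy
      simp

theorem get?_mk_map_value (l : List (String × Int)) (g : Int → Int) (x : String) :
    (PySem.Dict.mk (l.map (fun p => (p.1, g p.2)))).get? x =
      Option.map g ((PySem.Dict.mk l).get? x) := by
  induction l with
  | nil => rfl
  | cons p rest ih =>
    obtain ⟨k, v⟩ := p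
    simp only [List.map_cons, PySem.Dict.get?_mk_cons]
    by_cases hp : (k == x) = true
    · simp only [hp, if_true, Option.map_some]
    · simp only [Bool.not_eq_true] at hp
      simp only [hp, Bool.false_eq_true, if_false]
      exact ih

theorem keys_mk_map (l : List (String × Int)) (g : Int → Int) :
    (PySem.Dict.mk (l.map (fun p => (p.1, g p.2)))).keys = (PySem.Dict.mk l).keys := by
  simp [PySem.Dict.keys, List.map_map]

theorem inv_union {uf : PyUF} {comp size nxt ord ρ} (h : UFRel uf comp size nxt ord ρ)
    {a b : String} (ha : a ∈ uf.father.keys) (hb : b ∈ uf.father.keys) :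
    ∃ ord' ρ',
      UFRel (ufUnion uf a b)
        (if comp.getD a 0 ≠ comp.getD b 0 then
           PySem.Dict.mk (comp.items.map (fun p => (p.1, if p.2 == comp.getD a 0 then comp.getD b 0 else p.2)))
         else comp)
        (if comp.getD a 0 ≠ comp.getD b 0 then
           size.modify (comp.getD b 0) 0 (· + size.getD (comp.getD a 0) 0)
         else size) nxt ord' ρ' ∧
      (ufUnion uf a b).father.keys = uf.father.keys := by
  obtain ⟨hfx1, hrel1, hk1, hs1⟩ := inv_find h ha
  have hb1 : b ∈ (ufFind uf a).2.father.keys := by rw [hk1]; exact hb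
  obtain ⟨hfy1, hrel2, hk2, hs2⟩ := inv_find hrel1 hb1
  have hk21 : (ufFind (ufFind uf a).2 b).2.father.keys = uf.father.keys := hk2.trans hk1
  have ha2 : a ∈ (ufFind (ufFind uf a).2 b).2.father.keys := by rw [hk21]; exact ha
  have hb2 : b ∈ (ufFind (ufFind uf a).2 b).2.father.keys := by rw [hk21]; exact hb
  obtain ⟨hf2, hkeys2, hroot2, hlab2, hsz2, hlt2, hpos2⟩ := hrel2
  have hdef : ufUnion uf a b = (if (ufFind uf a).1 ≠ (ufFind (ufFind uf a).2 b).1 then { father := (ufFind (ufFind uf a).2 b).2.father.insert (ufFind uf a).1 (some (ufFind (ufFind uf a).2 b).1), numOfSet := (ufFind (ufFind uf a).2 b).2.numOfSet - 1, sizeOfSet := (ufFind (ufFind uf a).2 b).2.sizeOfSet.modify (ufFind (ufFind uf a).2 b).1 0 (· + (ufFind (ufFind uf a).2 b).2.sizeOfSet.getD (ufFind uf a).1 0) } else (ufFind (ufFind uf a).2 b).2) := rfl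
  rw [hfx1, hfy1] at hdef
  by_cases hcc : ρ a = ρ b
  · -- already connected: nothing changes on either side
    have hlabeq : comp.getD a 0 = comp.getD b 0 := (hlab2 a ha2 b hb2).mp hcc
    rw [if_neg (by simpa using hcc)] at hdef
    rw [if_neg (by simpa using hlabeq), if_neg (by simpa using hlabeq), hdef]
    exact ⟨ord, ρ, ⟨hf2, hkeys2, hroot2, hlab2, hsz2, hlt2, hpos2⟩, hk21⟩
  · -- merge the two components
    have hcc' : comp.getD a 0 ≠ comp.getD b 0 := fun he => hcc ((hlab2 a ha2 b hb2).mpr he)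
    rw [if_pos hcc] at hdef
    rw [if_pos hcc', if_pos hcc', hdef]
    have hrel2' : UFRel (ufFind (ufFind uf a).2 b).2 comp size nxt ord ρ :=
      ⟨hf2, hkeys2, hroot2, hlab2, hsz2, hlt2, hpos2⟩
    have hra : (ufFind (ufFind uf a).2 b).2.father.get? (ρ a) = some none := rho_get_none hrel2' ha2
    have hrb : (ufFind (ufFind uf a).2 b).2.father.get? (ρ b) = some none := rho_get_none hrel2' hb2
    have hrma : ρ a ∈ (ufFind (ufFind uf a).2 b).2.father.keys := rho_mem hrel2' ha2
    have hrmb : ρ b ∈ (ufFind (ufFind uf a).2 b).2.father.keys := rho_mem hrel2' hb2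
    have hfixa : ρ (ρ a) = ρ a := rho_fix hrel2' ha2
    have hfixb : ρ (ρ b) = ρ b := rho_fix hrel2' hb2
    have hkF' : ((ufFind (ufFind uf a).2 b).2.father.insert (ρ a) (some (ρ b))).keys
        = (ufFind (ufFind uf a).2 b).2.father.keys :=
      PySem.Dict.keys_insert_of_contains _ _ ((PySem.Dict.contains_iff_mem_keys _ _).mpr hrma)
    have hkC' : (PySem.Dict.mk (comp.items.map (fun p => (p.1, if p.2 == comp.getD a 0 then comp.getD b 0 else p.2)))).keys = comp.keys :=
      keys_mk_map comp.items (fun v => if v == comp.getD a 0 then comp.getD b 0 else v)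
    -- relabelled lookups
    have hgd : ∀ x ∈ comp.keys,
        (PySem.Dict.mk (comp.items.map (fun p => (p.1, if p.2 == comp.getD a 0 then comp.getD b 0 else p.2)))).getD x 0
          = (if comp.getD x 0 = comp.getD a 0 then comp.getD b 0 else comp.getD x 0) := by
      intro x hx
      have hg := get?_mk_map_value comp.items (fun v => if v == comp.getD a 0 then comp.getD b 0 else v) x
      rcases hgx : comp.get? x with _ | v
      · exact absurd ((PySem.Dict.get?_eq_none_iff_not_mem_keys comp x).mp hgx) (by simp [hx])
      · have hvx : comp.getD x 0 = v := by rw [PySem.Dict.getD_eq_get?_getD, hgx]; rfl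
        rw [PySem.Dict.getD_eq_get?_getD, hg, hgx]
        simp only [Option.map_some, Option.getD_some, hvx, beq_iff_eq]
    refine ⟨fun y => if ρ y = ρ b then ord y + (ord (ρ a) + 1) else ord y,
           fun y => if ρ y = ρ a then ρ b else ρ y, ⟨?_, ?_, ?_, ?_, ?_, ?_, ?_⟩, by
             show (PySem.Dict.insert _ _ _).keys = _
             rw [hkF', hk21]⟩
    · -- Forest
      intro y p hq
      simp only [PyUF.father] at hq ⊢
      rw [hkF']
      by_cases hy : y = ρ a
      · subst hy
        rw [PySem.Dict.get?_insert_self] at hq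
        have hp : p = ρ b := by simpa using hq.symm
        subst hp
        rw [if_neg (by rw [hfixa]; exact hcc), if_pos hfixb]
        exact ⟨by omega, hrmb⟩
      · rw [PySem.Dict.get?_insert_of_ne _ _ hy] at hq
        obtain ⟨h1, h2⟩ := hf2 y p hq
        have he : ρ y = ρ p := rho_edge hrel2' hq
        refine ⟨?_, h2⟩
        by_cases hyb : ρ y = ρ b
        · rw [if_pos hyb, if_pos (he ▸ hyb)]; omega
        · rw [if_neg hyb, if_neg (he ▸ hyb)]; exact h1
    · -- keys
      show (PySem.Dict.insert _ _ _).keys = _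
      rw [hkF', hkC', hkeys2]
    · -- Root
      intro y hy
      simp only [PyUF.father] at hy ⊢
      rw [hkF'] at hy
      obtain ⟨n, hn⟩ := hroot2 y hy
      by_cases hyr : ρ y = ρ a
      · rw [if_pos hyr]
        rw [hyr] at hn
        exact chase_insert_link_rx hra hrb hcc hn
      · rw [if_neg hyr]
        exact ⟨n, chase_insert_link_other hra hyr hn⟩
    · -- labels iff
      intro y hy z hz
      simp only [PyUF.father] at hy hz
      rw [hkF'] at hy hz
      have hyc : y ∈ comp.keys := hkeys2 ▸ hy
      have hzc : z ∈ comp.keys := hkeys2 ▸ hz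
      rw [hgd y hyc, hgd z hzc]
      beta_reduce
      by_cases h1 : ρ y = ρ a <;> by_cases h2 : ρ z = ρ a
      · rw [if_pos h1, if_pos h2, if_pos ((hlab2 y hy a ha2).mp h1), if_pos ((hlab2 z hz a ha2).mp h2)]
        simp
      · rw [if_pos h1, if_neg h2, if_pos ((hlab2 y hy a ha2).mp h1),
            if_neg (fun he => h2 ((hlab2 z hz a ha2).mpr he))]
        exact hlab2 b hb2 z hz
      · rw [if_neg h1, if_pos h2, if_neg (fun he => h1 ((hlab2 y hy a ha2).mpr he)),
            if_pos ((hlab2 z hz a ha2).mp h2)]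
        exact hlab2 y hy b hb2
      · rw [if_neg h1, if_neg h2, if_neg (fun he => h1 ((hlab2 y hy a ha2).mpr he)),
            if_neg (fun he => h2 ((hlab2 z hz a ha2).mpr he))]
        exact hlab2 y hy z hz
    · -- sizes
      intro y hy
      simp only [PyUF.father] at hy ⊢
      rw [hkF'] at hy
      have hyc : y ∈ comp.keys := hkeys2 ▸ hy
      rw [hgd y hyc]
      rw [PySem.Dict.getD_modify, PySem.Dict.getD_modify]
      have hsa := hsz2 a ha2
      have hsb := hsz2 b hb2
      by_cases h1 : ρ y = ρ a
      · rw [if_pos h1, if_pos ((hlab2 y hy a ha2).mp h1), if_pos rfl, if_pos rfl]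
        rw [hsa, hsb]
      · rw [if_neg h1, if_neg (fun he => h1 ((hlab2 y hy a ha2).mpr he))]
        by_cases h2 : ρ y = ρ b
        · rw [if_pos h2, if_pos ((hlab2 y hy b hb2).mp h2)]
          rw [hsa, hsb]
        · rw [if_neg h2, if_neg (fun he => h2 ((hlab2 y hy b hb2).mpr he))]
          exact hsz2 y hy
    · -- labels < nxt
      intro y hy
      simp only [] at hy
      rw [hkF'] at hy
      have hyc : y ∈ comp.keys := hkeys2 ▸ hy
      rw [hgd y hyc]
      by_cases h1 : comp.getD y 0 = comp.getD a 0
      · rw [if_pos h1]; exact hlt2 b hb2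
      · rw [if_neg h1]; exact hlt2 y hy
    · -- sizes positive
      intro y hy
      simp only [PyUF.father] at hy
      rw [hkF'] at hy
      have hyc : y ∈ comp.keys := hkeys2 ▸ hy
      rw [hgd y hyc]
      rw [PySem.Dict.getD_modify]
      have hpa := hpos2 a ha2
      have hpb := hpos2 b hb2
      by_cases h1 : comp.getD y 0 = comp.getD a 0
      · rw [if_pos h1, if_pos rfl]; omega
      · rw [if_neg h1]
        by_cases h2 : comp.getD y 0 = comp.getD b 0
        · rw [if_pos h2]; omega
        · rw [if_neg h2]; exact hpos2 y hy

theorem get?_eq_some_getD {κ ν : Type} [BEq κ] [LawfulBEq κ] (d : PySem.Dict κ ν) {x : κ}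
    (hx : x ∈ d.keys) (d0 : ν) : d.get? x = some (d.getD x d0) := by
  rcases hg : d.get? x with _ | v
  · exact absurd ((PySem.Dict.get?_eq_none_iff_not_mem_keys d x).mp hg) (by simp [hx])
  · rw [PySem.Dict.getD_eq_get?_getD, hg]; rfl

theorem inv_getSize {uf : PyUF} {comp size nxt ord ρ} (h : UFRel uf comp size nxt ord ρ)
    {a : String} (ha : a ∈ uf.father.keys) :
    (ufGetSize uf a).1 = size.getD (comp.getD a 0) 0 ∧
    UFRel (ufGetSize uf a).2 comp size nxt ord ρ ∧
    (ufGetSize uf a).2.father.keys = uf.father.keys := by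
  obtain ⟨h1, h2, h3, h4⟩ := inv_find h ha
  refine ⟨?_, h2, h3⟩
  show (ufFind uf a).2.sizeOfSet.getD (ufFind uf a).1 0 = _
  rw [h1, h4]
  exact h.2.2.2.2.1 a ha

theorem step2_spec {uf : PyUF} {comp size nxt ord ρ} (h : UFRel uf comp size nxt ord ρ)
    {a b : String} (ha : a ∈ uf.father.keys) (hb : b ∈ uf.father.keys) (ms : Int) (root : String) :
    UFRel (aStep2 (uf, ms, root) a b).1 comp size nxt ord ρ ∧
    (aStep2 (uf, ms, root) a b).1.father.keys = uf.father.keys ∧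
    (aStep2 (uf, ms, root) a b).2.1 = (bSelStep comp size (root, ms) (a, b)).2 ∧
    (aStep2 (uf, ms, root) a b).2.2 = (bSelStep comp size (root, ms) (a, b)).1 ∧
    ((aStep2 (uf, ms, root) a b).2.2 = root ∨ (aStep2 (uf, ms, root) a b).2.2 ∈ uf.father.keys) ∧
    (ms < size.getD (comp.getD a 0) 0 → (aStep2 (uf, ms, root) a b).2.2 ∈ uf.father.keys) := by
  obtain ⟨hsa, hrel1, hk1⟩ := inv_getSize h ha
  have hdefA : aStep2 (uf, ms, root) a b =
      (let st1 : PyUF × Int × String :=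
        if ms < (ufGetSize uf a).1 then
          ((ufGetSize (ufGetSize uf a).2 a).2, (ufGetSize (ufGetSize uf a).2 a).1, a)
        else ((ufGetSize uf a).2, ms, root)
      let gb := ufGetSize st1.1 b
      if st1.2.1 < gb.1 then ((ufGetSize gb.2 b).2, (ufGetSize gb.2 b).1, b)
      else (gb.2, st1.2.1, st1.2.2)) := rfl
  have hdefB : bSelStep comp size (root, ms) (a, b) =
      (let st1 : String × Int :=
        if ms < size.getD (comp.getD a 0) 0 then (a, size.getD (comp.getD a 0) 0) else (root, ms)
      if st1.2 < size.getD (comp.getD b 0) 0 then (b, size.getD (comp.getD b 0) 0) else st1) := rfl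
  rw [hdefA, hdefB]
  simp only [hsa]
  by_cases hc1 : ms < size.getD (comp.getD a 0) 0
  · simp only [if_pos hc1]
    have ha1 : a ∈ (ufGetSize uf a).2.father.keys := by rw [hk1]; exact ha
    obtain ⟨hsa2, hrel2, hk2⟩ := inv_getSize hrel1 ha1
    simp only [hsa2]
    have hb2 : b ∈ (ufGetSize (ufGetSize uf a).2 a).2.father.keys := by rw [hk2, hk1]; exact hb
    obtain ⟨hsb, hrel3, hk3⟩ := inv_getSize hrel2 hb2
    simp only [hsb]
    by_cases hc2 : size.getD (comp.getD a 0) 0 < size.getD (comp.getD b 0) 0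
    · simp only [if_pos hc2]
      have hb3 : b ∈ (ufGetSize (ufGetSize (ufGetSize uf a).2 a).2 b).2.father.keys := by
        rw [hk3, hk2, hk1]; exact hb
      obtain ⟨hsb2, hrel4, hk4⟩ := inv_getSize hrel3 hb3
      simp only [hsb2]
      refine ⟨hrel4, by rw [hk4, hk3, hk2, hk1], by trivial, by trivial, Or.inr ?_, fun _ => ?_⟩
      · exact hb
      · exact hb
    · simp only [if_neg hc2]
      refine ⟨hrel3, by rw [hk3, hk2, hk1], by trivial, by trivial, Or.inr ?_, fun _ => ?_⟩
      · exact ha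
      · exact ha
  · simp only [if_neg hc1]
    have hb1 : b ∈ (ufGetSize uf a).2.father.keys := by rw [hk1]; exact hb
    obtain ⟨hsb, hrel2, hk2⟩ := inv_getSize hrel1 hb1
    simp only [hsb]
    by_cases hc2 : ms < size.getD (comp.getD b 0) 0
    · simp only [if_pos hc2]
      have hb2 : b ∈ (ufGetSize (ufGetSize uf a).2 b).2.father.keys := by rw [hk2, hk1]; exact hb
      obtain ⟨hsb2, hrel3, hk3⟩ := inv_getSize hrel2 hb2
      simp only [hsb2]
      refine ⟨hrel3, by rw [hk3, hk2, hk1], by trivial, by trivial, Or.inr ?_, fun _ => ?_⟩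
      · exact hb
      · exact hb
    · simp only [if_neg hc2]
      exact ⟨hrel2, by rw [hk2, hk1], by trivial, by trivial, Or.inl (by trivial), fun hcx => absurd hcx hc1⟩

theorem phase2 {comp : PySem.Dict String Int} {size : PySem.Dict Int Int} {nxt : Int}
    {ord : String → Nat} {ρ : String → String} :
    ∀ (pairs : List (String × String)) (uf : PyUF) (ms : Int) (root : String),
      UFRel uf comp size nxt ord ρ →
      (∀ ab ∈ pairs, ab.1 ∈ uf.father.keys ∧ ab.2 ∈ uf.father.keys) →
      UFRel (pairs.foldl (fun st ab => aStep2 st ab.1 ab.2) (uf, ms, root)).1 comp size nxt ord ρ ∧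
      (pairs.foldl (fun st ab => aStep2 st ab.1 ab.2) (uf, ms, root)).1.father.keys = uf.father.keys ∧
      (pairs.foldl (fun st ab => aStep2 st ab.1 ab.2) (uf, ms, root)).2.1
        = (pairs.foldl (bSelStep comp size) (root, ms)).2 ∧
      (pairs.foldl (fun st ab => aStep2 st ab.1 ab.2) (uf, ms, root)).2.2
        = (pairs.foldl (bSelStep comp size) (root, ms)).1 ∧
      ((pairs.foldl (fun st ab => aStep2 st ab.1 ab.2) (uf, ms, root)).2.2 = root ∨
        (pairs.foldl (fun st ab => aStep2 st ab.1 ab.2) (uf, ms, root)).2.2 ∈ uf.father.keys) := by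
  intro pairs
  induction pairs with
  | nil => intro uf ms root h _; exact ⟨h, rfl, rfl, rfl, Or.inl rfl⟩
  | cons ab rest ih =>
    intro uf ms root h hmem
    obtain ⟨ha, hb⟩ := hmem ab (List.mem_cons_self ..)
    obtain ⟨hrel1, hk1, hms1, hroot1, hor1, _⟩ := step2_spec h ha hb ms root
    simp only [List.foldl_cons]
    have hstep : aStep2 (uf, ms, root) ab.1 ab.2 =
        ((aStep2 (uf, ms, root) ab.1 ab.2).1, (aStep2 (uf, ms, root) ab.1 ab.2).2.1,
          (aStep2 (uf, ms, root) ab.1 ab.2).2.2) := rfl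
    have hstepB : bSelStep comp size (root, ms) ab =
        ((bSelStep comp size (root, ms) ab).1, (bSelStep comp size (root, ms) ab).2) := rfl
    rw [hstep, hstepB, hms1, hroot1]
    have hmem' : ∀ p ∈ rest, p.1 ∈ (aStep2 (uf, ms, root) ab.1 ab.2).1.father.keys ∧
        p.2 ∈ (aStep2 (uf, ms, root) ab.1 ab.2).1.father.keys := by
      intro p hp
      rw [hk1]
      exact hmem p (List.mem_cons_of_mem _ hp)
    obtain ⟨hA, hB, hC, hD, hE⟩ := ih (aStep2 (uf, ms, root) ab.1 ab.2).1
      (bSelStep comp size (root, ms) ab).2 (bSelStep comp size (root, ms) ab).1 hrel1 hmem'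
    refine ⟨hA, hB.trans hk1, hC, hD, ?_⟩
    rcases hE with hE | hE
    · rw [hE, ← hroot1]
      rcases hor1 with h1 | h1
      · exact Or.inl h1
      · exact Or.inr h1
    · rw [hk1] at hE; exact Or.inr hE

theorem inv_isConnected {uf : PyUF} {comp size nxt ord ρ} (h : UFRel uf comp size nxt ord ρ)
    {a r : String} (ha : a ∈ uf.father.keys) (hr : r ∈ uf.father.keys) :
    (ufIsConnected uf a r).1 = (comp.get? a == comp.get? r) ∧
    UFRel (ufIsConnected uf a r).2 comp size nxt ord ρ ∧
    (ufIsConnected uf a r).2.father.keys = uf.father.keys := by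
  obtain ⟨h1, hrel1, hk1, _⟩ := inv_find h ha
  have hr1 : r ∈ (ufFind uf a).2.father.keys := by rw [hk1]; exact hr
  obtain ⟨h2, hrel2, hk2, _⟩ := inv_find hrel1 hr1
  refine ⟨?_, hrel2, hk2.trans hk1⟩
  show ((ufFind uf a).1 == (ufFind (ufFind uf a).2 r).1) = _
  rw [h1, h2, get?_eq_some_getD comp (h.2.1 ▸ ha) 0, get?_eq_some_getD comp (h.2.1 ▸ hr) 0]
  by_cases he : ρ a = ρ r
  · have := (h.2.2.2.1 a ha r hr).mp he
    simp [he, this]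
  · have : ¬ (comp.getD a 0 = comp.getD r 0) := fun hx => he ((h.2.2.2.1 a ha r hr).mpr hx)
    simp [he, this]

theorem phase3 {comp : PySem.Dict String Int} {size : PySem.Dict Int Int} {nxt : Int}
    {ord : String → Nat} {ρ : String → String} {root : String} :
    ∀ (pairs : List (String × String)) (uf : PyUF) (res : PySem.Set String),
      UFRel uf comp size nxt ord ρ →
      (∀ ab ∈ pairs, ab.1 ∈ uf.father.keys ∧ ab.2 ∈ uf.father.keys) →
      root ∈ uf.father.keys →
      (pairs.foldl (fun st ab => aStep3 root st ab.1 ab.2) (uf, res)).2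
        = pairs.foldl (bCollectStep comp (comp.get? root)) res := by
  intro pairs
  induction pairs with
  | nil => intro uf res _ _ _; rfl
  | cons ab rest ih =>
    intro uf res h hmem hroot
    obtain ⟨ha, hb⟩ := hmem ab (List.mem_cons_self ..)
    obtain ⟨hv1, hrel1, hk1⟩ := inv_isConnected h ha hroot
    have hb1 : ab.2 ∈ (ufIsConnected uf ab.1 root).2.father.keys := by rw [hk1]; exact hb
    have hroot1 : root ∈ (ufIsConnected uf ab.1 root).2.father.keys := by rw [hk1]; exact hroot
    obtain ⟨hv2, hrel2, hk2⟩ := inv_isConnected hrel1 hb1 hroot1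
    simp only [List.foldl_cons]
    have hstepA : aStep3 root (uf, res) ab.1 ab.2 =
        ((ufIsConnected (ufIsConnected uf ab.1 root).2 ab.2 root).2,
          (if (ufIsConnected (ufIsConnected uf ab.1 root).2 ab.2 root).1 = true then
            (if (ufIsConnected uf ab.1 root).1 = true then res.add ab.1 else res).add ab.2
          else (if (ufIsConnected uf ab.1 root).1 = true then res.add ab.1 else res))) := rfl
    have hstepB : bCollectStep comp (comp.get? root) res ab =
        (if (comp.get? ab.2 == comp.get? root) = true then
          (if (comp.get? ab.1 == comp.get? root) = true then res.add ab.1 else res).add ab.2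
        else (if (comp.get? ab.1 == comp.get? root) = true then res.add ab.1 else res)) := rfl
    rw [hstepA, hstepB, hv1, hv2]
    have hmem' : ∀ p ∈ rest,
        p.1 ∈ (ufIsConnected (ufIsConnected uf ab.1 root).2 ab.2 root).2.father.keys ∧
        p.2 ∈ (ufIsConnected (ufIsConnected uf ab.1 root).2 ab.2 root).2.father.keys := by
      intro p hp
      rw [hk2, hk1]
      exact hmem p (List.mem_cons_of_mem _ hp)
    exact ih _ _ hrel2 hmem' (by rw [hk2, hk1]; exact hroot)

def UFInv (uf : PyUF) (st : PySem.Dict String Int × PySem.Dict Int Int × Int) : Prop :=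
  ∃ ord ρ, UFRel uf st.1 st.2.1 st.2.2 ord ρ

theorem inv_union_inv {uf : PyUF} {comp size nxt ord ρ} (hrel : UFRel uf comp size nxt ord ρ)
    {a b : String} (ha : a ∈ uf.father.keys) (hb : b ∈ uf.father.keys) :
    UFInv (ufUnion uf a b)
      (if comp.getD a 0 ≠ comp.getD b 0 then
        (PySem.Dict.mk (comp.items.map (fun p => (p.1, if p.2 == comp.getD a 0 then comp.getD b 0 else p.2))),
         size.modify (comp.getD b 0) 0 (· + size.getD (comp.getD a 0) 0), nxt)
       else (comp, size, nxt)) ∧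
    (ufUnion uf a b).father.keys = uf.father.keys := by
  obtain ⟨ord', ρ', hrelU, hkU⟩ := inv_union hrel ha hb
  by_cases hcc : comp.getD a 0 ≠ comp.getD b 0
  · rw [if_pos hcc]
    rw [if_pos hcc, if_pos hcc] at hrelU
    exact ⟨⟨ord', ρ', hrelU⟩, hkU⟩
  · rw [if_neg hcc]
    rw [if_neg hcc, if_neg hcc] at hrelU
    exact ⟨⟨ord', ρ', hrelU⟩, hkU⟩

theorem inv_step1 {uf : PyUF} {comp : PySem.Dict String Int} {size : PySem.Dict Int Int} {nxt : Int}
    (h : UFInv uf (comp, size, nxt)) (a b : String) :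
    UFInv (aStep1 uf a b) (bPhase1Step (comp, size, nxt) (a, b)) ∧
    (∀ x ∈ uf.father.keys, x ∈ (aStep1 uf a b).father.keys) ∧
    a ∈ (aStep1 uf a b).father.keys ∧ b ∈ (aStep1 uf a b).father.keys := by
  obtain ⟨ord, ρ, hrel⟩ := h
  have hkeys := hrel.2.1
  by_cases hca : comp.contains a = true
  · have hma : a ∈ uf.father.keys := by
      rw [hkeys]; exact (PySem.Dict.contains_iff_mem_keys _ _).mp hca
    have hA1 : ufAdd uf a = uf := inv_add_mem hma
    by_cases hcb : comp.contains b = true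
    · have hmb : b ∈ uf.father.keys := by
        rw [hkeys]; exact (PySem.Dict.contains_iff_mem_keys _ _).mp hcb
      have hA2 : ufAdd uf b = uf := inv_add_mem hmb
      have hB : bPhase1Step (comp, size, nxt) (a, b) =
          (if comp.getD a 0 ≠ comp.getD b 0 then
            (PySem.Dict.mk (comp.items.map (fun p => (p.1, if p.2 == comp.getD a 0 then comp.getD b 0 else p.2))),
             size.modify (comp.getD b 0) 0 (· + size.getD (comp.getD a 0) 0), nxt)
           else (comp, size, nxt)) := by
        simp only [bPhase1Step, hca, hcb, if_true]
      rw [hB, aStep1, hA1, hA2]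
      obtain ⟨hI, hK⟩ := inv_union_inv hrel hma hmb
      exact ⟨hI, fun x hx => hK ▸ hx, hK ▸ hma, hK ▸ hmb⟩
    · have hmb : b ∉ uf.father.keys := by
        rw [hkeys]; exact fun hx => hcb ((PySem.Dict.contains_iff_mem_keys _ _).mpr hx)
      obtain ⟨hrel2, hk2⟩ := inv_add_new hrel hmb
      have hma2 : a ∈ (ufAdd uf b).father.keys := by rw [hk2]; simp [hma]
      have hmb2 : b ∈ (ufAdd uf b).father.keys := by rw [hk2]; simp
      have hB : bPhase1Step (comp, size, nxt) (a, b) =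
          (if (comp.insert b nxt).getD a 0 ≠ (comp.insert b nxt).getD b 0 then
            (PySem.Dict.mk ((comp.insert b nxt).items.map (fun p => (p.1, if p.2 == (comp.insert b nxt).getD a 0 then (comp.insert b nxt).getD b 0 else p.2))),
             (size.insert nxt 1).modify ((comp.insert b nxt).getD b 0) 0 (· + (size.insert nxt 1).getD ((comp.insert b nxt).getD a 0) 0), nxt + 1)
           else (comp.insert b nxt, size.insert nxt 1, nxt + 1)) := by
        simp only [bPhase1Step, hca, hcb, if_true, Bool.false_eq_true, if_false]
      rw [hB, aStep1, hA1]
      obtain ⟨hI, hK⟩ := inv_union_inv hrel2 hma2 hmb2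
      refine ⟨hI, fun x hx => by rw [hK, hk2]; simp [hx], hK ▸ hma2, hK ▸ hmb2⟩
  · have hma : a ∉ uf.father.keys := by
      rw [hkeys]; exact fun hx => hca ((PySem.Dict.contains_iff_mem_keys _ _).mpr hx)
    obtain ⟨hrel1, hk1⟩ := inv_add_new hrel hma
    have hkeys1 := hrel1.2.1
    have hma1 : a ∈ (ufAdd uf a).father.keys := by rw [hk1]; simp
    by_cases hcb : (comp.insert a nxt).contains b = true
    · have hmb1 : b ∈ (ufAdd uf a).father.keys := by
        rw [hkeys1]; exact (PySem.Dict.contains_iff_mem_keys _ _).mp hcb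
      have hA2 : ufAdd (ufAdd uf a) b = ufAdd uf a := inv_add_mem hmb1
      have hB : bPhase1Step (comp, size, nxt) (a, b) =
          (if (comp.insert a nxt).getD a 0 ≠ (comp.insert a nxt).getD b 0 then
            (PySem.Dict.mk ((comp.insert a nxt).items.map (fun p => (p.1, if p.2 == (comp.insert a nxt).getD a 0 then (comp.insert a nxt).getD b 0 else p.2))),
             (size.insert nxt 1).modify ((comp.insert a nxt).getD b 0) 0 (· + (size.insert nxt 1).getD ((comp.insert a nxt).getD a 0) 0), nxt + 1)
           else (comp.insert a nxt, size.insert nxt 1, nxt + 1)) := by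
        simp only [bPhase1Step, hca, hcb, if_true, Bool.false_eq_true, if_false]
      rw [hB, aStep1, hA2]
      obtain ⟨hI, hK⟩ := inv_union_inv hrel1 hma1 hmb1
      refine ⟨hI, fun x hx => by rw [hK, hk1]; simp [hx], hK ▸ hma1, hK ▸ hmb1⟩
    · have hmb1 : b ∉ (ufAdd uf a).father.keys := by
        rw [hkeys1]; exact fun hx => hcb ((PySem.Dict.contains_iff_mem_keys _ _).mpr hx)
      obtain ⟨hrel2, hk2⟩ := inv_add_new hrel1 hmb1
      have hma2 : a ∈ (ufAdd (ufAdd uf a) b).father.keys := by rw [hk2]; simp [hma1]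
      have hmb2 : b ∈ (ufAdd (ufAdd uf a) b).father.keys := by rw [hk2]; simp
      have hB : bPhase1Step (comp, size, nxt) (a, b) =
          (if ((comp.insert a nxt).insert b (nxt+1)).getD a 0 ≠ ((comp.insert a nxt).insert b (nxt+1)).getD b 0 then
            (PySem.Dict.mk (((comp.insert a nxt).insert b (nxt+1)).items.map (fun p => (p.1, if p.2 == ((comp.insert a nxt).insert b (nxt+1)).getD a 0 then ((comp.insert a nxt).insert b (nxt+1)).getD b 0 else p.2))),
             ((size.insert nxt 1).insert (nxt+1) 1).modify (((comp.insert a nxt).insert b (nxt+1)).getD b 0) 0 (· + ((size.insert nxt 1).insert (nxt+1) 1).getD (((comp.insert a nxt).insert b (nxt+1)).getD a 0) 0), nxt + 1 + 1)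
           else ((comp.insert a nxt).insert b (nxt+1), (size.insert nxt 1).insert (nxt+1) 1, nxt + 1 + 1)) := by
        simp only [bPhase1Step, hca, hcb, Bool.false_eq_true, if_false]
      rw [hB, aStep1]
      obtain ⟨hI, hK⟩ := inv_union_inv hrel2 hma2 hmb2
      refine ⟨hI, fun x hx => by rw [hK, hk2, hk1]; simp [hx], hK ▸ hma2, hK ▸ hmb2⟩

theorem phase1 :
    ∀ (pairs : List (String × String)) (uf : PyUF)
      (st : PySem.Dict String Int × PySem.Dict Int Int × Int),
      UFInv uf st →
      UFInv (pairs.foldl (fun uf ab => aStep1 uf ab.1 ab.2) uf) (pairs.foldl bPhase1Step st) ∧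
      (∀ x ∈ uf.father.keys, x ∈ (pairs.foldl (fun uf ab => aStep1 uf ab.1 ab.2) uf).father.keys) ∧
      (∀ ab ∈ pairs, ab.1 ∈ (pairs.foldl (fun uf ab => aStep1 uf ab.1 ab.2) uf).father.keys ∧
        ab.2 ∈ (pairs.foldl (fun uf ab => aStep1 uf ab.1 ab.2) uf).father.keys) := by
  intro pairs
  induction pairs with
  | nil => intro uf st h; exact ⟨h, fun x hx => hx, by simp⟩
  | cons ab rest ih =>
    intro uf st h
    obtain ⟨comp, size, nxt⟩ := st
    obtain ⟨hI1, hsub1, hina, hinb⟩ := inv_step1 h ab.1 ab.2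
    simp only [List.foldl_cons]
    have hab : (ab.1, ab.2) = ab := rfl
    rw [hab] at hI1
    obtain ⟨hIf, hsubf, hmemf⟩ := ih (aStep1 uf ab.1 ab.2) (bPhase1Step (comp, size, nxt) ab) hI1
    refine ⟨hIf, fun x hx => hsubf x (hsub1 x hx), ?_⟩
    intro p hp
    rcases List.mem_cons.mp hp with hp | hp
    · subst hp; exact ⟨hsubf _ hina, hsubf _ hinb⟩
    · exact hmemf p hp

theorem foldl_range_getD {σ : Type} (f : σ → String → String → σ) :
    ∀ (la lb : List String), la.length ≤ lb.length → ∀ (init : σ),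
      (List.range la.length).foldl (fun s k => f s (la.getD k "") (lb.getD k "")) init
        = (la.zip lb).foldl (fun s ab => f s ab.1 ab.2) init := by
  intro la
  induction la with
  | nil => intro lb _ init; simp
  | cons a as ih =>
    intro lb hlen init
    cases lb with
    | nil => simp at hlen
    | cons b bs =>
      simp only [List.length_cons, List.range_succ_eq_map, List.foldl_cons, List.foldl_map,
        List.zip_cons_cons, List.getD_cons_zero, Nat.succ_eq_add_one, List.getD_cons_succ]
      exact ih bs (by simpa using hlen) (f init a b)

theorem foldl_pyRange_zip {σ : Type} (f : σ → String → String → σ)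
    (la lb : List String) (hlen : la.length ≤ lb.length) (init : σ) :
    (PySem.List.pyRange 0 (la.length : Int) 1).foldl
        (fun s i => f s (PySem.List.pyGetD la i "") (PySem.List.pyGetD lb i "")) init
      = (la.zip lb).foldl (fun s ab => f s ab.1 ab.2) init := by
  rw [PySem.List.pyRange_zero_natCast, List.foldl_map]
  simp only [PySem.List.pyGetD_natCast]
  exact foldl_range_getD f la lb hlen init

theorem ufinv_init :
    UFInv ⟨PySem.Dict.empty, 0, PySem.Dict.empty⟩ (PySem.Dict.empty, PySem.Dict.empty, 0) := by
  refine ⟨fun _ => 0, fun y => y, ?_, ?_, ?_, ?_, ?_, ?_, ?_⟩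
  · intro x p hq
    rw [show (PyUF.father ⟨PySem.Dict.empty, 0, PySem.Dict.empty⟩) = PySem.Dict.empty from rfl,
      PySem.Dict.get?_empty] at hq
    cases hq
  · show (PySem.Dict.empty : PySem.Dict String (Option String)).keys = _
    rw [PySem.Dict.keys_empty, PySem.Dict.keys_empty]
  all_goals intro x hx
  all_goals rw [show (PyUF.father ⟨PySem.Dict.empty, 0, PySem.Dict.empty⟩) = PySem.Dict.empty from rfl, PySem.Dict.keys_empty] at hx
  all_goals cases hx

def aFold1 (pairs : List (String × String)) : PyUF :=
  pairs.foldl (fun uf ab => aStep1 uf ab.1 ab.2) ⟨PySem.Dict.empty, 0, PySem.Dict.empty⟩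

def bFold1 (pairs : List (String × String)) : PySem.Dict String Int × PySem.Dict Int Int × Int :=
  pairs.foldl bPhase1Step (PySem.Dict.empty, PySem.Dict.empty, 0)

def aFold2 (pairs : List (String × String)) : PyUF × Int × String :=
  pairs.foldl (fun st ab => aStep2 st ab.1 ab.2) (aFold1 pairs, (0 : Int), "")

def bFold2 (pairs : List (String × String)) : String × Int :=
  pairs.foldl (bSelStep (bFold1 pairs).1 (bFold1 pairs).2.1) ("", 0)

theorem main_pairs (pairs : List (String × String)) :
    (pairs.foldl (fun st ab => aStep3 (aFold2 pairs).2.2 st ab.1 ab.2)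
        ((aFold2 pairs).1, PySem.Set.empty)).2
      = pairs.foldl (bCollectStep (bFold1 pairs).1 ((bFold1 pairs).1.get? (bFold2 pairs).1))
          PySem.Set.empty := by
  obtain ⟨hIf, hsub, hmem⟩ := phase1 pairs ⟨PySem.Dict.empty, 0, PySem.Dict.empty⟩
    (PySem.Dict.empty, PySem.Dict.empty, 0) ufinv_init
  obtain ⟨ord, ρ, hrel⟩ := hIf
  cases pairs with
  | nil => rfl
  | cons ab rest =>
    have hrel' : UFRel (aFold1 (ab :: rest)) (bFold1 (ab :: rest)).1 (bFold1 (ab :: rest)).2.1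
        (bFold1 (ab :: rest)).2.2 ord ρ := hrel
    obtain ⟨hina, hinb⟩ := hmem ab (List.mem_cons_self ..)
    have hina' : ab.1 ∈ (aFold1 (ab :: rest)).father.keys := hina
    have hinb' : ab.2 ∈ (aFold1 (ab :: rest)).father.keys := hinb
    obtain ⟨hrelS, hkS, hmsS, hrootS, _, hfire⟩ := step2_spec hrel' hina' hinb' 0 ""
    have hroot1 : (aStep2 (aFold1 (ab :: rest), (0 : Int), "") ab.1 ab.2).2.2
        ∈ (aFold1 (ab :: rest)).father.keys := by
      apply hfire
      have := hrel'.2.2.2.2.2.2 ab.1 hina'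
      omega
    have hmem' : ∀ p ∈ rest,
        p.1 ∈ (aStep2 (aFold1 (ab :: rest), (0 : Int), "") ab.1 ab.2).1.father.keys ∧
        p.2 ∈ (aStep2 (aFold1 (ab :: rest), (0 : Int), "") ab.1 ab.2).1.father.keys := by
      intro p hp
      rw [hkS]
      exact hmem p (List.mem_cons_of_mem _ hp)
    obtain ⟨h2rel, h2keys, h2ms, h2root, h2or⟩ := phase2 rest
      (aStep2 (aFold1 (ab :: rest), (0 : Int), "") ab.1 ab.2).1
      (aStep2 (aFold1 (ab :: rest), (0 : Int), "") ab.1 ab.2).2.1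
      (aStep2 (aFold1 (ab :: rest), (0 : Int), "") ab.1 ab.2).2.2
      hrelS hmem'
    have hunfold2 : aFold2 (ab :: rest) = rest.foldl (fun st ab => aStep2 st ab.1 ab.2)
        (aStep2 (aFold1 (ab :: rest), (0 : Int), "") ab.1 ab.2) := by
      rw [aFold2, List.foldl_cons]
    have hBstart : bSelStep (bFold1 (ab :: rest)).1 (bFold1 (ab :: rest)).2.1 ("", 0) ab
        = ((aStep2 (aFold1 (ab :: rest), (0 : Int), "") ab.1 ab.2).2.2,
           (aStep2 (aFold1 (ab :: rest), (0 : Int), "") ab.1 ab.2).2.1) := by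
      rw [hrootS, hmsS]
    have hunfoldB2 : bFold2 (ab :: rest) = rest.foldl
        (bSelStep (bFold1 (ab :: rest)).1 (bFold1 (ab :: rest)).2.1)
        ((aStep2 (aFold1 (ab :: rest), (0 : Int), "") ab.1 ab.2).2.2,
         (aStep2 (aFold1 (ab :: rest), (0 : Int), "") ab.1 ab.2).2.1) := by
      rw [bFold2, List.foldl_cons, hBstart]
    have h3rel : UFRel (aFold2 (ab :: rest)).1 (bFold1 (ab :: rest)).1
        (bFold1 (ab :: rest)).2.1 (bFold1 (ab :: rest)).2.2 ord ρ := by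
      rw [hunfold2]; exact h2rel
    have hm3 : ∀ p ∈ ab :: rest, p.1 ∈ (aFold2 (ab :: rest)).1.father.keys ∧
        p.2 ∈ (aFold2 (ab :: rest)).1.father.keys := by
      intro p hp
      rw [hunfold2, h2keys, hkS]
      exact hmem p hp
    have hroot3 : (aFold2 (ab :: rest)).2.2 ∈ (aFold2 (ab :: rest)).1.father.keys := by
      rw [hunfold2, h2keys, hkS]
      rcases h2or with h | h
      · rw [h]; exact hroot1
      · rw [hkS] at h; exact h
    have hsel : (bFold2 (ab :: rest)).1 = (aFold2 (ab :: rest)).2.2 := by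
      rw [hunfoldB2, hunfold2, h2root]
    rw [hsel]
    exact phase3 (root := (aFold2 (ab :: rest)).2.2) (ab :: rest) (aFold2 (ab :: rest)).1
      PySem.Set.empty h3rel hm3 hroot3

-- ===== VERDICT (by name: the statement is the Claim_ definition above) =====
theorem maximum_association_set_spec : Claim_equal_maximum_association_set := by
  intro la lb hdom hpre
  show maximum_association_set la lb = maximum_association_set_alt la lb
  have hlen : la.length ≤ lb.length := hpre
  simp only [maximum_association_set, maximum_association_set_alt]
  rw [foldl_pyRange_zip _ la lb hlen, foldl_pyRange_zip _ la lb hlen,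
    foldl_pyRange_zip _ la lb hlen]
  exact main_pairs (la.zip lb)
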